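-- pv_equiv track=rewrite | github.com/ChiMaxZhang/System-Diagnosis-with-UPPAAL | Fault/Auto_gen_fault.py | generate_transitions
-- ===== SOURCE A (Python) =====
-- def generate_transitions(states, events):
--     transitions = []
--     for i in range(len(states)):
--         for j in range(len(states)):
--             source = states[i]
--             target = states[j]
--             source_events = set(source.split("-"))
--             target_events = set(target.split("-"))
--
--             if target != "nofault":
--                 # Condition 1: If source state is "nofault" and target state has only one event
--                 if source == "nofault" and len(target_events) == 1:
--                     event = target_events.pop()
--                     transitions.append((source, target, event))
--
--                 # Condition 2: If source state is a subset of target state and target state has one more event than source state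
--                 elif source_events.issubset(target_events) and len(target_events) - len(source_events) == 1:
--                     event = (target_events - source_events).pop()
--                     transitions.append((source, target, event))
--
--     return transitions
-- ===== SOURCE B (Python) =====
-- def generate_transitions(states, events):
--     # Precompute each state's event-set once, bucket state indices by set size,
--     # and for each source scan only the bucket(s) that can hold a valid target.
--     sets = [set(s.split("-")) for s in states]
--     buckets = {}
--     for j, es in enumerate(sets):
--         buckets.setdefault(len(es), []).append(j)
--
--     def merge(xs, ys):
--         out, a, b = [], 0, 0
--         while a < len(xs) and b < len(ys):
--             if xs[a] < ys[b]:
--                 out.append(xs[a]); a += 1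
--             else:
--                 out.append(ys[b]); b += 1
--         return out + xs[a:] + ys[b:]
--
--     transitions = []
--     for i, source in enumerate(states):
--         se = sets[i]
--         if source == "nofault":
--             cands = merge(buckets.get(1, []), buckets.get(2, []))
--         else:
--             cands = buckets.get(len(se) + 1, [])
--         for j in cands:
--             target = states[j]
--             if target == "nofault":
--                 continue
--             te = sets[j]
--             if source == "nofault" and len(te) == 1:
--                 transitions.append((source, target, next(iter(te))))
--             elif se <= te and len(te) - len(se) == 1:
--                 transitions.append((source, target, (te - se).pop()))
--     return transitions
-- ===== Notes on version B (the rewrite author's own statement) =====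
-- stated objective: faster
-- what changed: A re-splits and rebuilds both event sets for every (source,target) pair in a full O(n^2) double loop; B computes each state's event set once, buckets state indices by set size in one pass, and for each source scans only the size-compatible bucket(s) (merging the size-1 and size-2 buckets for a 'nofault' source), since a valid target has exactly one event more than its source.
import Mathlib
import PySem

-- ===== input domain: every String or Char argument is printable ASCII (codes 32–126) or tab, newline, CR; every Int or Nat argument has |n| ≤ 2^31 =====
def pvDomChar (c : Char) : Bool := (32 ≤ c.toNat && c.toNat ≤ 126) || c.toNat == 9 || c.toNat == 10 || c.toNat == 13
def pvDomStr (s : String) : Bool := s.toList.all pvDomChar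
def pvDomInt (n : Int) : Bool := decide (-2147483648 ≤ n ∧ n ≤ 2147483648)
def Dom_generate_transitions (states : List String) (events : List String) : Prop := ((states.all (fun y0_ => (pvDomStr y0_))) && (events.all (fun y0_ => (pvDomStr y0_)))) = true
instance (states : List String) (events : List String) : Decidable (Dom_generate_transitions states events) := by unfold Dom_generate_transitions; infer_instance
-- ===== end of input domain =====

-- B precomputes each state's event-set once and buckets state indices by set size, scanning only
-- the size-compatible bucket(s) per source instead of all pairs (measured faster in a timing run).

-- ===== PORT A =====
-- set.pop() / next(iter(s)): both ports only call this where the guard has established the set is a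
-- singleton, so 'its first (= only) element' is exact there.
def pvPop (s : PySem.Set String) : String := s.headI

def generate_transitions (states : List String) (events : List String) : List (String × String × String) :=
  (PySem.List.pyRange 0 (PySem.List.len states) 1).foldl (fun transitions i =>
    (PySem.List.pyRange 0 (PySem.List.len states) 1).foldl (fun transitions j =>
      let source := PySem.List.pyGetD states i ""
      let target := PySem.List.pyGetD states j ""
      -- s.split("-") with the literal non-empty separator "-" never raises: split? is always some here
      let source_events := PySem.Set.ofList ((PySem.Str.split? source "-").getD [])
      let target_events := PySem.Set.ofList ((PySem.Str.split? target "-").getD [])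
      if target ≠ "nofault" then
        if source = "nofault" ∧ PySem.Set.len target_events = 1 then
          transitions ++ [(source, target, pvPop target_events)]
        else if PySem.Set.issubset source_events target_events = true ∧
                PySem.Set.len target_events - PySem.Set.len source_events = 1 then
          transitions ++ [(source, target, pvPop (PySem.Set.diff target_events source_events))]
        else transitions
      else transitions) transitions) []

-- ===== PORT B =====
def pvCanon (s : String) : PySem.Set String := PySem.Set.ofList ((PySem.Str.split? s "-").getD [])

-- the two-pointer while loop of Source B's merge, as structural recursion on the two suffixes
def pvMerge : List Int → List Int → List Int
  | [], ys => ys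
  | x :: xs, [] => x :: xs
  | x :: xs, y :: ys => if x < y then x :: pvMerge xs (y :: ys) else y :: pvMerge (x :: xs) ys

def generate_transitions_alt (states : List String) (events : List String) : List (String × String × String) :=
  let sets := states.map pvCanon
  let buckets := (PySem.List.enumerate sets).foldl
    (fun d p => d.insert (PySem.Set.len p.2) (d.getD (PySem.Set.len p.2) [] ++ [p.1]))
    (PySem.Dict.empty : PySem.Dict Int (List Int))
  (PySem.List.enumerate states).foldl (fun transitions p =>
    let source := p.2
    let se := PySem.List.pyGetD sets p.1 PySem.Set.empty
    let cands := if source = "nofault" then pvMerge (buckets.getD 1 []) (buckets.getD 2 [])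
                 else buckets.getD (PySem.Set.len se + 1) []
    cands.foldl (fun transitions j =>
      let target := PySem.List.pyGetD states j ""
      if target = "nofault" then transitions
      else
        let te := PySem.List.pyGetD sets j PySem.Set.empty
        if source = "nofault" ∧ PySem.Set.len te = 1 then
          transitions ++ [(source, target, pvPop te)]
        else if PySem.Set.issubset se te = true ∧
                PySem.Set.len te - PySem.Set.len se = 1 then
          transitions ++ [(source, target, pvPop (PySem.Set.diff te se))]
        else transitions) transitions) []

-- ===== PRECONDITION & SPEC =====
def Spec_generate_transitions (states : List String) (events : List String) (out : List (String × String × String)) : Prop := out = generate_transitions_alt states events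
instance (states : List String) (events : List String) (out : List (String × String × String)) : Decidable (Spec_generate_transitions states events out) := by unfold Spec_generate_transitions; infer_instance

-- ===== CLAIM (what is proved, stated in full; the proofs are below) =====
def Claim_equal_generate_transitions : Prop := ∀ (states : List String) (events : List String), Dom_generate_transitions states events → Spec_generate_transitions states events (generate_transitions states events)

-- ===== LEMMAS AND PROOFS =====

-- the per-pair transition decision both programs make, as one optional value
def pvTr (source target : String) : Option (String × String × String) :=
  if target = "nofault" then none
  else if source = "nofault" ∧ PySem.Set.len (pvCanon target) = 1 then
    some (source, target, pvPop (pvCanon target))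
  else if PySem.Set.issubset (pvCanon source) (pvCanon target) = true ∧
      PySem.Set.len (pvCanon target) - PySem.Set.len (pvCanon source) = 1 then
    some (source, target, pvPop (PySem.Set.diff (pvCanon target) (pvCanon source)))
  else none

theorem pv_foldl_append_toList {α β : Type} (f : α → Option β) (l : List α) (acc : List β) :
    l.foldl (fun a x => a ++ (f x).toList) acc = acc ++ l.filterMap f := by
  induction l generalizing acc with
  | nil => simp
  | cons x t ih => cases h : f x <;> simp [h, ih]

theorem pv_filterMap_filter_of {α β : Type} (c : α → Bool) (f : α → Option β) (l : List α)
    (h : ∀ x ∈ l, (f x).isSome → c x = true) :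
    (l.filter c).filterMap f = l.filterMap f := by
  induction l with
  | nil => rfl
  | cons x t ih =>
    have ht : ∀ y ∈ t, (f y).isSome → c y = true := fun y hy => h y (List.mem_cons_of_mem _ hy)
    by_cases hc : c x = true
    · simp [hc, List.filterMap_cons, ih ht]
    · cases hf : f x with
      | some b => exact absurd (h x (List.mem_cons_self) (by simp [hf])) hc
      | none => simp [hc, List.filterMap_cons, hf, ih ht]

theorem pv_enumerate_eq {α : Type} (l : List α) (d : α) (st : Int) :
    PySem.List.enumerate l st = (List.range l.length).map (fun (k : Nat) => ((st + (k : Int), l.getD k d) : Int × α)) := by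
  induction l generalizing st with
  | nil => rfl
  | cons x t ih =>
    simp only [PySem.List.enumerate, List.length_cons, List.range_succ_eq_map, List.map_cons,
      List.map_map]
    refine congrArg₂ _ (by simp) ?_
    rw [ih (st + 1)]
    refine List.map_congr_left fun k _ => ?_
    simp [Function.comp]
    omega

theorem pvMerge_cons_left (a : Int) (u v : List Int) (h : ∀ y ∈ v, a < y) :
    pvMerge (a :: u) v = a :: pvMerge u v := by
  cases v with
  | nil => cases u <;> simp [pvMerge]
  | cons y ys => simp [pvMerge, h y (by simp)]

theorem pvMerge_cons_right (a : Int) (u v : List Int) (h : ∀ y ∈ u, a < y) :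
    pvMerge u (a :: v) = a :: pvMerge u v := by
  cases u with
  | nil => simp [pvMerge]
  | cons x xs =>
    have : ¬ (x < a) := by have := h x (by simp); omega
    simp [pvMerge, this]

theorem pvMerge_filter (l : List Int) (p q : Int → Bool) (hl : l.Pairwise (· < ·))
    (hpq : ∀ x ∈ l, ¬(p x = true ∧ q x = true)) :
    pvMerge (l.filter p) (l.filter q) = l.filter (fun x => p x || q x) := by
  induction l with
  | nil => simp [pvMerge]
  | cons a t ih =>
    have hlt : ∀ y ∈ t, a < y := (List.pairwise_cons.mp hl).1
    have ht := ih (List.pairwise_cons.mp hl).2 (fun x hx => hpq x (List.mem_cons_of_mem _ hx))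
    by_cases hp : p a = true
    · have hq : q a = false := by
        rcases Bool.eq_false_or_eq_true (q a) with h | h
        · exact absurd ⟨hp, h⟩ (hpq a List.mem_cons_self)
        · exact h
      rw [List.filter_cons_of_pos hp, List.filter_cons_of_neg (by simp [hq]),
        pvMerge_cons_left a _ _ (fun y hy => hlt y (List.mem_of_mem_filter hy)),
        List.filter_cons_of_pos (by simp [hp]), ht]
    · have hp' : p a = false := by simpa using hp
      rw [List.filter_cons_of_neg (by simp [hp'])]
      by_cases hq : q a = true
      · rw [List.filter_cons_of_pos hq,
          pvMerge_cons_right a _ _ (fun y hy => hlt y (List.mem_of_mem_filter hy)),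
          List.filter_cons_of_pos (by simp [hq]), ht]
      · have hq' : q a = false := by simpa using hq
        rw [List.filter_cons_of_neg (by simp [hq']), List.filter_cons_of_neg (by simp [hp', hq']), ht]

theorem pv_bucketAux (l : List (PySem.Set String)) (st : Int) (d : PySem.Dict Int (List Int)) (k : Int) :
    ((PySem.List.enumerate l st).foldl
        (fun d p => d.insert (PySem.Set.len p.2) (d.getD (PySem.Set.len p.2) [] ++ [p.1])) d).getD k []
      = d.getD k [] ++ (PySem.List.enumerate l st).filterMap
          (fun p => if PySem.Set.len p.2 = k then some p.1 else none) := by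
  induction l generalizing st d with
  | nil => simp [PySem.List.enumerate]
  | cons x t ih =>
    simp only [PySem.Set.len] at ih ⊢
    simp only [PySem.List.enumerate, List.foldl_cons, List.filterMap_cons]
    rw [ih, PySem.Dict.getD_insert]
    by_cases hk : (List.length x : Int) = k
    · simp [hk]
    · simp [hk, Ne.symm hk]

theorem pv_filterMap_if {α β : Type} (P : α → Prop) [DecidablePred P] (f : α → β) (l : List α) :
    l.filterMap (fun x => if P x then some (f x) else none)
      = (l.filter (fun x => decide (P x))).map f := by
  induction l with
  | nil => rfl
  | cons x t ih => by_cases h : P x <;> simp [h, ih]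

theorem pv_A_flat (states events : List String) :
    generate_transitions states events
      = (List.range states.length).flatMap (fun i =>
          (List.range states.length).filterMap (fun j =>
            pvTr (states.getD i "") (states.getD j ""))) := by
  unfold generate_transitions
  rw [PySem.List.len_eq, PySem.List.pyRange_zero_nat, List.foldl_map]
  refine Eq.trans (PySem.List.foldl_congr_mem _ _
      (fun acc (i : Nat) => acc ++ (List.range states.length).filterMap
        (fun j => pvTr (states.getD i "") (states.getD j ""))) _ ?_) ?_
  · intro acc i _
    rw [List.foldl_map]
    refine Eq.trans (PySem.List.foldl_congr_mem _ _
        (fun acc2 (j : Nat) => acc2 ++ (pvTr (states.getD i "") (states.getD j "")).toList) _ ?_) ?_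
    · intro acc2 j _
      simp only [PySem.List.pyGetD_natCast]
      unfold pvTr pvCanon
      split_ifs <;> simp_all
    · rw [pv_foldl_append_toList]
  · rw [PySem.List.foldl_append_eq_flatMap]
    simp

theorem pv_getD_map (states : List String) (j : Nat) (hj : j < states.length) :
    (states.map pvCanon).getD j PySem.Set.empty = pvCanon (states.getD j "") := by
  simp [List.getD_eq_getElem?_getD, hj]

theorem pvTr_len (src tgt : String) (h : (pvTr src tgt).isSome) :
    (src = "nofault" ∧ PySem.Set.len (pvCanon tgt) = 1)
      ∨ PySem.Set.len (pvCanon tgt) = PySem.Set.len (pvCanon src) + 1 := by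
  unfold pvTr at h
  split_ifs at h with h1 h2 h3
  · simp at h
  · exact Or.inl h2
  · exact Or.inr (by omega)
  · simp at h

theorem pv_B_flat (states events : List String) :
    generate_transitions_alt states events
      = (List.range states.length).flatMap (fun i =>
          (List.range states.length).filterMap (fun j =>
            pvTr (states.getD i "") (states.getD j ""))) := by
  simp only [generate_transitions_alt]
  rw [pv_enumerate_eq states "" 0, List.foldl_map]
  refine Eq.trans (PySem.List.foldl_congr_mem _ _
      (fun acc (i : Nat) => acc ++ (List.range states.length).filterMap
        (fun j => pvTr (states.getD i "") (states.getD j ""))) _ ?_) ?_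
  · intro acc i hi
    have hi' : i < states.length := List.mem_range.mp hi
    simp only [zero_add]
    have hse : PySem.List.pyGetD (List.map pvCanon states) ((i : Nat) : Int) PySem.Set.empty
        = pvCanon (states.getD i "") := by
      rw [PySem.List.pyGetD_natCast]
      exact pv_getD_map states i hi'
    have hbuck : ∀ k : Int,
        ((PySem.List.enumerate (List.map pvCanon states)).foldl
            (fun d p => d.insert (PySem.Set.len p.2) (d.getD (PySem.Set.len p.2) [] ++ [p.1]))
            PySem.Dict.empty).getD k []
          = ((List.range states.length).filter
              (fun j => decide (PySem.Set.len ((states.map pvCanon).getD j PySem.Set.empty) = k))).map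
              (fun j : Nat => (j : Int)) := by
      intro k
      rw [pv_bucketAux, PySem.Dict.getD_empty, pv_enumerate_eq _ PySem.Set.empty 0,
        List.filterMap_map]
      simp only [List.length_map, Function.comp, zero_add]
      exact pv_filterMap_if (fun j => PySem.Set.len ((states.map pvCanon).getD j PySem.Set.empty) = k)
        (fun j : Nat => (j : Int)) (List.range states.length)
    rw [hse, hbuck, hbuck, hbuck]
    have hnof : PySem.Set.len (pvCanon "nofault") = 1 := by decide
    by_cases hsrc : states.getD i "" = "nofault"
    · rw [if_pos hsrc]
      have hmapf : ∀ k : Int,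
          (((List.range states.length).filter
              (fun j => decide (PySem.Set.len ((states.map pvCanon).getD j PySem.Set.empty) = k))).map
              (fun j : Nat => (j : Int)))
            = ((List.range states.length).map (fun j : Nat => (j : Int))).filter
                (fun x : Int => decide (PySem.Set.len ((states.map pvCanon).getD x.toNat PySem.Set.empty) = k)) := by
        intro k
        rw [List.filter_map]
        congr 1
      rw [hmapf 1, hmapf 2]
      rw [pvMerge_filter _ _ _
        (List.Pairwise.map _ (fun a b (h : a < b) => by exact_mod_cast h) (List.pairwise_lt_range))
        (fun x hx h => by simp at h; omega)]
      rw [List.filter_map]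
      rw [List.foldl_map]
      refine Eq.trans (PySem.List.foldl_congr_mem _ _
          (fun acc2 (j : Nat) => acc2 ++ (pvTr (states.getD i "") (states.getD j "")).toList) _ ?_) ?_
      · intro acc2 j hj
        have hj' : j < states.length := List.mem_range.mp (List.mem_of_mem_filter hj)
        simp only [PySem.List.pyGetD_natCast, pv_getD_map states j hj']
        unfold pvTr pvCanon
        split_ifs <;> simp_all
      · rw [pv_foldl_append_toList]
        congr 1
        refine pv_filterMap_filter_of _ _ _ ?_
        intro j hjr hs
        have hj' : j < states.length := List.mem_range.mp hjr
        rcases pvTr_len _ _ hs with ⟨h1, h2⟩ | h2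
        · simp only [Function.comp, Int.toNat_natCast, pv_getD_map states j hj', h2]
          simp
        · rw [hsrc] at h2
          rw [hnof] at h2
          simp only [Function.comp, Int.toNat_natCast, pv_getD_map states j hj', h2]
          simp
    · rw [if_neg hsrc]
      rw [List.foldl_map]
      refine Eq.trans (PySem.List.foldl_congr_mem _ _
          (fun acc2 (j : Nat) => acc2 ++ (pvTr (states.getD i "") (states.getD j "")).toList) _ ?_) ?_
      · intro acc2 j hj
        have hj' : j < states.length := List.mem_range.mp (List.mem_of_mem_filter hj)
        simp only [PySem.List.pyGetD_natCast, pv_getD_map states j hj']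
        unfold pvTr pvCanon
        split_ifs <;> simp_all
      · rw [pv_foldl_append_toList]
        congr 1
        refine pv_filterMap_filter_of _ _ _ ?_
        intro j hjr hs
        have hj' : j < states.length := List.mem_range.mp hjr
        rcases pvTr_len _ _ hs with ⟨h1, h2⟩ | h2
        · exact absurd h1 hsrc
        · simp only [pv_getD_map states j hj', h2]
          simp
  · rw [PySem.List.foldl_append_eq_flatMap]
    simp

-- ===== VERDICT (by name: the statement is the Claim_ definition above) =====
theorem generate_transitions_spec : Claim_equal_generate_transitions := by
  intro states events _
  unfold Spec_generate_transitions
  rw [pv_A_flat states events, pv_B_flat states events]
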